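-- pv_equiv track=rewrite | github.com/muyongKim/Step-By-Step | Leetcode/Easy/FirstUniqueCharacterInAString.py | solution
-- ===== SOURCE A (Python) =====
-- def solution(s):
--     dict = {}
--     output = 0
--
--     for c in s:
--         if c not in dict:
--             dict[c] = 0
--         dict[c] += 1
--
--     keys = list(dict.keys())
--
--     for k in keys:
--         if dict[k] > 1:
--             del(dict[k])
--
--     if dict:
--         output = s.find(str(list(dict.keys())[0]))
--     else:
--         output = -1
--
--     return output
-- ===== SOURCE B (Python) =====
-- def solution(s):
--     freq = {}
--     for c in s:
--         freq[c] = freq.get(c, 0) + 1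
--     for i, c in enumerate(s):
--         if freq[c] == 1:
--             return i
--     return -1
-- ===== Notes on version B (the rewrite author's own statement) =====
-- stated objective: idiomatic
-- what changed: B replaces A's key-deletion pass over the dict and the extra s.find() substring scan with a single forward enumerate scan returning the first index whose character has frequency 1.
import Mathlib
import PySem

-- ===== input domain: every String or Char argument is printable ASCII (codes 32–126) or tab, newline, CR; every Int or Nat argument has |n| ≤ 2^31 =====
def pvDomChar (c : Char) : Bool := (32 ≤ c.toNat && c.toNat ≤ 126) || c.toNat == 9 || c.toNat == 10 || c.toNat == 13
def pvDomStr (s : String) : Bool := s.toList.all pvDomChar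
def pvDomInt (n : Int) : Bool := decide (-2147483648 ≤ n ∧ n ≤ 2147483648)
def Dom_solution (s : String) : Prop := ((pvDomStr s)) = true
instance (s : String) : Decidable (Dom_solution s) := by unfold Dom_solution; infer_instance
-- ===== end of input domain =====

-- B replaces A's dict-key-deletion pass and s.find() call with a single forward enumerate scan; return values proved equal on all strings.

-- ===== PORT A =====
-- 'if c not in dict: dict[c] = 0' then 'dict[c] += 1'
def updateCount (d : PySem.Dict Char Int) (c : Char) : PySem.Dict Char Int :=
  let d1 := if d.contains c then d else d.insert c 0
  d1.insert c (d1.getD c 0 + 1)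

def solution (s : String) : Int :=
  let d := s.toList.foldl updateCount PySem.Dict.empty
  let keys := d.keys
  -- 'for k in keys: if dict[k] > 1: del(dict[k])'
  let d2 := keys.foldl (fun d k => if 1 < d.getD k 0 then d.erase k else d) d
  -- 'if dict: output = s.find(str(list(dict.keys())[0])) else: output = -1'
  match d2.keys with
  | [] => -1
  | k :: _ => PySem.Str.find s (String.ofList [k])

-- ===== PORT B =====
-- 'for i, c in enumerate(s): if freq[c] == 1: return i' / 'return -1'
def bScan (freq : PySem.Dict Char Int) : List (Int × Char) → Int
  | [] => -1
  | (i, c) :: rest => if freq.getD c 0 == 1 then i else bScan freq rest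

def solution_alt (s : String) : Int :=
  let freq := s.toList.foldl (fun d c => d.insert c (d.getD c 0 + 1)) PySem.Dict.empty
  bScan freq (PySem.List.enumerate s.toList)

-- ===== PRECONDITION & SPEC =====
def Spec_solution (s : String) (out : Int) : Prop := out = solution_alt s
instance (s : String) (out : Int) : Decidable (Spec_solution s out) := by unfold Spec_solution; infer_instance

-- ===== CLAIM (what is proved, stated in full; the proofs are below) =====
def Claim_equal_solution : Prop := ∀ (s : String), Dom_solution s → Spec_solution s (solution s)

-- ===== LEMMAS AND PROOFS =====

lemma map_fst_pair (f : Char → Int) (xs : List Char) :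
    xs.map ((fun p : Char × Int => p.1) ∘ fun k => (k, f k)) = xs := by
  induction xs <;> simp_all

-- the common normal form both programs compute
def firstUniq (l : List Char) : Int :=
  match l.findIdx? (fun c => l.count c == 1) with
  | some j => (j : Int)
  | none => -1

-- A's counting loop is Counter(s)
lemma countLoop_eq_counter (l : List Char) :
    l.foldl updateCount PySem.Dict.empty = PySem.Dict.counter l := by
  rw [PySem.List.foldl_congr_mem _ _ (fun d x => d.insert x (d.getD x 0 + 1)) _ ?_,
      PySem.Dict.foldl_insert_getD_add_one_eq_counter]
  intro d c _
  by_cases h : d.contains c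
  · simp [updateCount, h]
  · simp only [Bool.not_eq_true] at h
    simp [updateCount, h, PySem.Dict.getD_insert_self, PySem.Dict.insert_insert_self,
      PySem.Dict.getD_of_not_contains d 0 h]

-- under nodup keys, find? on items retrieves the item
lemma find?_items {ps : List (Char × Int)} {p : Char × Int}
    (hnd : (ps.map Prod.fst).Nodup) (h : p ∈ ps) :
    ps.find? (fun q => q.1 == p.1) = some p := by
  induction ps with
  | nil => cases h
  | cons q t ih =>
    simp only [List.map_cons, List.nodup_cons, List.mem_map] at hnd
    rcases List.mem_cons.mp h with h | h
    · simp [List.find?, h]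
    · have hne : ¬ (q.1 == p.1) = true := by
        simp only [beq_iff_eq]
        intro he; exact hnd.1 ⟨p, h, he.symm⟩
      simp [List.find?, hne, ih hnd.2 h]

-- A's deletion loop, at the items level
lemma eraseLoop_items (ks : List Char) :
    ∀ (d : PySem.Dict Char Int), (d.items.map Prod.fst).Nodup →
    (ks.foldl (fun d k => if 1 < d.getD k 0 then d.erase k else d) d).items
      = d.items.filter (fun p => !(decide (p.1 ∈ ks) && decide (1 < p.2))) := by
  induction ks with
  | nil => intro d _; simp
  | cons k t ih =>
    intro d hnd
    have hgd : ∀ p ∈ d.items, d.getD p.1 0 = p.2 := by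
      intro p hp
      simp [PySem.Dict.getD, PySem.Dict.get?, find?_items hnd hp]
    simp only [List.foldl_cons]
    by_cases hk : 1 < d.getD k 0
    · have hnd' : ((d.erase k).items.map Prod.fst).Nodup := by
        simp only [PySem.Dict.erase]
        exact ((List.filter_sublist).map Prod.fst).nodup hnd
      rw [if_pos hk, ih _ hnd']
      simp only [PySem.Dict.erase, List.filter_filter]
      apply List.filter_congr
      intro p hp
      by_cases he : p.1 = k
      · have : 1 < p.2 := by rw [← hgd p hp, he]; exact hk
        simp [he, this]
      · simp [he]
    · rw [if_neg hk, ih _ hnd]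
      apply List.filter_congr
      intro p hp
      by_cases he : p.1 = k
      · have : ¬ 1 < p.2 := by rw [← hgd p hp, he]; exact hk
        simp [he, this]
      · simp [he]

-- Set.ofList commutes with filter
lemma foldl_add_filter (p : Char → Bool) (l : List Char) :
    ∀ s : PySem.Set Char, (l.foldl PySem.Set.add s).filter p
      = (l.filter p).foldl PySem.Set.add (s.filter p) := by
  induction l with
  | nil => intro s; simp
  | cons c t ih =>
    intro s
    by_cases hp : p c
    · by_cases hc : c ∈ s
      · have h1 : PySem.Set.add s c = s := by simp [PySem.Set.add, PySem.Set.contains, hc]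
        have h2 : c ∈ List.filter p s := List.mem_filter.mpr ⟨hc, hp⟩
        have h3 : PySem.Set.add (List.filter p s) c = List.filter p s := by
          simp [PySem.Set.add, PySem.Set.contains, h2]
        simp only [List.foldl_cons, List.filter_cons_of_pos hp, h1, h3, ih]
      · have h1 : PySem.Set.add s c = s ++ [c] := by simp [PySem.Set.add, PySem.Set.contains, hc]
        have h2 : c ∉ List.filter p s := fun hmem => hc (List.mem_filter.mp hmem).1
        have h3 : PySem.Set.add (List.filter p s) c = List.filter p s ++ [c] := by
          simp [PySem.Set.add, PySem.Set.contains, h2]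
        rw [List.foldl_cons, h1, ih, List.filter_cons_of_pos hp, List.foldl_cons, h3,
          List.filter_append]
        simp [hp]
    · by_cases hc : c ∈ s
      · have h1 : PySem.Set.add s c = s := by simp [PySem.Set.add, PySem.Set.contains, hc]
        rw [List.foldl_cons, h1, ih, List.filter_cons_of_neg hp]
      · have h1 : PySem.Set.add s c = s ++ [c] := by simp [PySem.Set.add, PySem.Set.contains, hc]
        rw [List.foldl_cons, h1, ih, List.filter_cons_of_neg hp, List.filter_append]
        simp [hp]

lemma ofList_filter (p : Char → Bool) (l : List Char) :
    (PySem.Set.ofList l).filter p = PySem.Set.ofList (l.filter p) := by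
  rw [PySem.Set.ofList_eq_foldl, PySem.Set.ofList_eq_foldl, foldl_add_filter]
  rfl

-- a fold of Set.add only appends
lemma foldl_add_prefix (l : List Char) :
    ∀ s : PySem.Set Char, ∃ r, l.foldl PySem.Set.add s = s ++ r := by
  induction l with
  | nil => exact fun s => ⟨[], by simp⟩
  | cons c t ih =>
    intro s
    by_cases hc : c ∈ s
    · have h1 : PySem.Set.add s c = s := by simp [PySem.Set.add, PySem.Set.contains, hc]
      rw [List.foldl_cons, h1]
      exact ih s
    · have h1 : PySem.Set.add s c = s ++ [c] := by simp [PySem.Set.add, PySem.Set.contains, hc]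
      obtain ⟨r, hr⟩ := ih (s ++ [c])
      refine ⟨c :: r, ?_⟩
      rw [List.foldl_cons, h1, hr, List.append_assoc]
      rfl

lemma ofList_cons (c : Char) (t : List Char) :
    ∃ r, PySem.Set.ofList (c :: t) = c :: r := by
  rw [PySem.Set.ofList_eq_foldl]
  simpa [PySem.Set.add, PySem.Set.contains] using foldl_add_prefix t [c]

-- find of a single-character needle is findIdx? of equality
lemma find_go_single (k : Char) (l : List Char) :
    ∀ j : Nat, PySem.Chars.find.go [k] l j
      = (match l.findIdx? (fun c => c == k) with
         | some m => ((j + m : Nat) : Int)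
         | none => -1) := by
  induction l with
  | nil => intro j; simp [PySem.Chars.find.go]
  | cons c t ih =>
    intro j
    by_cases h : c = k
    · simp [PySem.Chars.find.go, List.isPrefixOf, h, List.findIdx?_cons]
    · have hne : (k == c) = false := by simp [Ne.symm h]
      have hne' : (c == k) = false := by simp [h]
      rw [show PySem.Chars.find.go [k] (c :: t) j
            = if [k].isPrefixOf (c :: t) then (j : Int) else PySem.Chars.find.go [k] t (j + 1)
          from rfl]
      simp only [List.isPrefixOf, hne, Bool.false_and]
      rw [ih (j + 1)]
      simp only [List.findIdx?_cons, hne']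
      cases hfi : t.findIdx? (fun c => c == k) with
      | none => simp
      | some m => simp only [Option.map_some]; push_cast; ring

-- if k heads l.filter p then the first p-match and the first k-match coincide
lemma findIdx?_head_filter {p : Char → Bool} {k : Char} {r : List Char} :
    ∀ {l : List Char}, l.filter p = k :: r → l.findIdx? (fun c => c == k) = l.findIdx? p := by
  intro l
  induction l with
  | nil => intro h; simp at h
  | cons c t ih =>
    intro h
    by_cases hp : p c
    · rw [List.filter_cons_of_pos hp] at h
      have hc : c = k := (List.cons_eq_cons.mp h).1
      rw [hc] at hp
      simp [List.findIdx?_cons, hc, hp]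
    · rw [List.filter_cons_of_neg hp] at h
      have hk : p k := by
        have : k ∈ t.filter p := by rw [h]; exact List.mem_cons_self
        exact (List.mem_filter.mp this).2
      have hck : (c == k) = false := by
        simp only [beq_eq_false_iff_ne, ne_eq]
        intro he; rw [he] at hp; exact hp hk
      simp [List.findIdx?_cons, hck, hp, ih h]

-- B's scan over enumerate
lemma bScan_enumerate (F : PySem.Dict Char Int) (p : Char → Bool)
    (hp : ∀ c, (F.getD c 0 == 1) = p c) :
    ∀ (t : List Char) (i : Int), bScan F (PySem.List.enumerate t i)
      = (match t.findIdx? p with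
         | some m => i + (m : Int)
         | none => -1) := by
  intro t
  induction t with
  | nil => intro i; simp [PySem.List.enumerate, bScan]
  | cons c t ih =>
    intro i
    rw [show PySem.List.enumerate (c :: t) i = (i, c) :: PySem.List.enumerate t (i + 1) from rfl]
    rw [show bScan F ((i, c) :: PySem.List.enumerate t (i + 1))
          = if F.getD c 0 == 1 then i else bScan F (PySem.List.enumerate t (i + 1)) from rfl]
    rw [hp c, ih (i + 1)]
    by_cases hc : p c
    · simp [List.findIdx?_cons, hc]
    · simp only [List.findIdx?_cons, hc, if_false, Bool.false_eq_true]
      cases hfi : t.findIdx? p with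
      | none => simp
      | some m => simp only [Option.map_some]; push_cast; ring

theorem solution_eq_firstUniq (s : String) : solution s = firstUniq s.toList := by
  have hz : solution s =
      (match ((s.toList.foldl updateCount PySem.Dict.empty).keys.foldl
          (fun d k => if 1 < d.getD k 0 then d.erase k else d)
          (s.toList.foldl updateCount PySem.Dict.empty)).keys with
       | [] => -1
       | k :: _ => PySem.Str.find s (String.ofList [k])) := rfl
  rw [hz]
  set l := s.toList with hl
  rw [countLoop_eq_counter]
  have hnd : ((PySem.Dict.counter l).items.map Prod.fst).Nodup :=
    PySem.Dict.nodup_keys_counter l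
  rw [PySem.Dict.keys_counter]
  have hitems := eraseLoop_items (PySem.Set.ofList l) (PySem.Dict.counter l) hnd
  have hkeys : ((PySem.Set.ofList l).foldl
      (fun d k => if 1 < d.getD k 0 then d.erase k else d) (PySem.Dict.counter l)).keys
      = PySem.Set.ofList (l.filter (fun c => l.count c == 1)) := by
    rw [PySem.Dict.keys, hitems, PySem.Dict.items_counter, List.filter_map, List.map_map]
    rw [← ofList_filter]
    have hcong : ∀ k ∈ PySem.Set.ofList l,
        ((fun p : Char × Int => !(decide (p.1 ∈ PySem.Set.ofList l) && decide (1 < p.2))) ∘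
          (fun k => (k, (l.count k : Int)))) k = (l.count k == 1) := by
      intro k hk
      have hmem : k ∈ l := (PySem.Set.mem_ofList l k).mp hk
      have hpos : 0 < l.count k := List.count_pos_iff.mpr hmem
      simp only [Function.comp_apply, hk, decide_true, Bool.true_and]
      rcases eq_or_ne (l.count k) 1 with h1 | h1
      · simp [h1]
      · have hlt : (1 : Int) < l.count k := by exact_mod_cast by omega
        simp [h1, hlt]
    rw [List.filter_congr hcong]
    exact map_fst_pair _ _
  rw [hkeys]
  unfold firstUniq
  cases hf : l.filter (fun c => l.count c == 1) with
  | nil =>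
    have hnone : l.findIdx? (fun c => l.count c == 1) = none := by
      rw [List.findIdx?_eq_none_iff]
      intro x hx
      have := List.filter_eq_nil_iff.mp hf x hx
      simpa using this
    rw [hnone]
    rfl
  | cons k r =>
    obtain ⟨r', hr'⟩ := ofList_cons k r
    rw [hr']
    rw [show (match (k :: r' : List Char) with
        | [] => (-1 : Int)
        | k :: _ => PySem.Str.find s (String.ofList [k])) = PySem.Str.find s (String.ofList [k])
      from rfl]
    have hbridge : PySem.Str.find s (String.ofList [k]) = PySem.Chars.find.go [k] l 0 := by
      simp [PySem.Str.find, PySem.Chars.find, hl]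
    rw [hbridge, find_go_single k l 0, findIdx?_head_filter hf]
    cases hfi : l.findIdx? (fun c => l.count c == 1) with
    | none => rfl
    | some m => simp

theorem alt_eq_firstUniq (s : String) : solution_alt s = firstUniq s.toList := by
  unfold solution_alt firstUniq
  rw [PySem.Dict.foldl_insert_getD_add_one_eq_counter]
  have hp : ∀ c, ((PySem.Dict.counter s.toList).getD c 0 == 1) = (s.toList.count c == 1) := by
    intro c
    rw [PySem.Dict.getD_counter]
    rcases eq_or_ne (s.toList.count c) 1 with h | h <;> simp [h]
  rw [bScan_enumerate _ _ hp s.toList 0]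
  cases hfi : s.toList.findIdx? (fun c => s.toList.count c == 1) with
  | none => simp
  | some m => simp

-- ===== VERDICT (by name: the statement is the Claim_ definition above) =====
theorem solution_spec : Claim_equal_solution := by
  intro s _
  unfold Spec_solution
  rw [solution_eq_firstUniq, alt_eq_firstUniq]
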